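-- pv_equiv track=rewrite | github.com/brisabn/TP2-Alg2 | algoritmos.py | update_visited
-- ===== SOURCE A (Python) =====
-- def update_visited(path, curr_level):
--     # track nodes visitados no current path
--     visited = []
--     for i in range(len(path) - 1):
--         if i + 1 not in path[:curr_level]:
--             visited.append(False)
--         else:
--             visited.append(True)
--     return visited
-- ===== SOURCE B (Python) =====
-- def update_visited(path, curr_level):
--     # scatter: mark output slot for each in-range node in the prefix
--     n = len(path)
--     visited = [False] * (n - 1)
--     for v in path[:curr_level]:
--         if 1 <= v <= n - 1:
--             visited[v - 1] = True
--     return visited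
-- ===== Notes on version B (the rewrite author's own statement) =====
-- stated objective: faster
-- what changed: Replaces the per-index membership scan over the prefix (gather) with a single pass over the prefix that marks visited[v-1] for each in-range value (scatter), after allocating the output once.
import Mathlib
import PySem

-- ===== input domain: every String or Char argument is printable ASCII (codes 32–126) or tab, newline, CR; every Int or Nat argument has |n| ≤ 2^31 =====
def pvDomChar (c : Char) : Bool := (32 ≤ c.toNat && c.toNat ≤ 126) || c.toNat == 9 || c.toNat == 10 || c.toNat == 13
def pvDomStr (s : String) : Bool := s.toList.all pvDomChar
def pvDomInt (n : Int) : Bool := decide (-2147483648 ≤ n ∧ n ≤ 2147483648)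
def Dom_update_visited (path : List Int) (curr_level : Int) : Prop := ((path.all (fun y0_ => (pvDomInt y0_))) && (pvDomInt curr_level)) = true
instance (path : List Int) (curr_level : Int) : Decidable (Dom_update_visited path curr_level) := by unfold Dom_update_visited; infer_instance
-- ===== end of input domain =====

-- B replaces A's per-index membership scan of the prefix with a single scatter pass
-- over the prefix into a pre-allocated output (objective: faster).

-- ===== PORT A =====
def update_visited (path : List Int) (curr_level : Int) : List Bool :=
  (PySem.List.pyRange 0 ((path.length : Int) - 1) 1).foldl
    (fun visited i =>
      if ¬ ((i + 1) ∈ PySem.List.slice path none (some curr_level)) then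
        visited ++ [false]
      else
        visited ++ [true])
    []

-- ===== PORT B =====
def update_visited_alt (path : List Int) (curr_level : Int) : List Bool :=
  (PySem.List.slice path none (some curr_level)).foldl
    (fun visited v =>
      if 1 ≤ v ∧ v ≤ (path.length : Int) - 1 then
        PySem.List.pySetD visited (v - 1) true
      else
        visited)
    (List.replicate (path.length - 1) false)

-- ===== PRECONDITION & SPEC =====
def Spec_update_visited (path : List Int) (curr_level : Int) (out : List Bool) : Prop := out = update_visited_alt path curr_level
instance (path : List Int) (curr_level : Int) (out : List Bool) : Decidable (Spec_update_visited path curr_level out) := by unfold Spec_update_visited; infer_instance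

-- ===== CLAIM (what is proved, stated in full; the proofs are below) =====
def Claim_equal_update_visited : Prop := ∀ (path : List Int) (curr_level : Int), Dom_update_visited path curr_level → Spec_update_visited path curr_level (update_visited path curr_level)

-- ===== LEMMAS AND PROOFS =====

-- A's append-a-boolean loop is a map.
theorem foldA (p : Int → Prop) [DecidablePred p] (l : List Int) :
    ∀ (acc : List Bool),
      l.foldl (fun vis i => if ¬ p i then vis ++ [false] else vis ++ [true]) acc =
        acc ++ l.map (fun i => decide (p i)) := by
  induction l with
  | nil => intro acc; simp
  | cons x l ih =>
      intro acc
      simp only [List.foldl_cons, List.map_cons]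
      rw [ih]
      by_cases h : p x <;> simp [h]

-- A's result in closed form.
theorem A_shape (path : List Int) (curr_level : Int) :
    update_visited path curr_level =
      (List.range (path.length - 1)).map
        (fun (k : Nat) => decide (((k : Int) + 1) ∈ PySem.List.slice path none (some curr_level))) := by
  unfold update_visited
  rw [foldA (p := fun i => (i + 1) ∈ PySem.List.slice path none (some curr_level))]
  rw [PySem.List.pyRange_one]
  have h : (((path.length : Int) - 1) - 0).toNat = path.length - 1 := by omega
  rw [h, List.map_map]
  simp

-- B's loop preserves the length of the accumulator.
theorem B_len (n : Nat) (L : List Int) (s : List Bool) :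
    (L.foldl (fun visited v =>
        if 1 ≤ v ∧ v ≤ (n : Int) - 1 then PySem.List.pySetD visited (v - 1) true
        else visited) s).length = s.length := by
  induction L generalizing s with
  | nil => rfl
  | cons v L ih =>
      simp only [List.foldl_cons]
      rw [ih]
      by_cases h : 1 ≤ v ∧ v ≤ (n : Int) - 1
      · rw [if_pos h, PySem.List.length_pySetD]
      · rw [if_neg h]

-- Invariant of B's scatter loop: slot k records old value OR membership of k+1.
theorem B_inv (n : Nat) (L : List Int) (k : Nat) (hk : k < n - 1) :
    ∀ (s : List Bool), s.length = n - 1 →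
    (L.foldl (fun visited v =>
        if 1 ≤ v ∧ v ≤ (n : Int) - 1 then PySem.List.pySetD visited (v - 1) true
        else visited) s)[k]? =
      some ((s[k]?.getD false) || decide (((k : Int) + 1) ∈ L)) := by
  induction L with
  | nil =>
      intro s hs
      simp [List.getElem?_eq_getElem (by omega : k < s.length)]
  | cons v L ih =>
      intro s hs
      simp only [List.foldl_cons]
      by_cases h : 1 ≤ v ∧ v ≤ (n : Int) - 1
      · rw [if_pos h]
        have h0 : (0:Int) ≤ v - 1 := by omega
        rw [PySem.List.pySetD_of_nonneg _ _ h0]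
        have hlen : (s.set (v-1).toNat true).length = n - 1 := by simp [hs]
        rw [ih _ hlen]
        have hkl : k < s.length := by omega
        have hkl' : k < (s.set (v-1).toNat true).length := by simp [hs]; omega
        by_cases hkv : (k : Int) + 1 = v
        · have hkk : (v-1).toNat = k := by omega
          rw [List.getElem?_eq_getElem hkl', List.getElem?_eq_getElem hkl]
          simp [hkk, hkv]
        · rw [List.getElem?_eq_getElem hkl', List.getElem?_eq_getElem hkl]
          have hmem : decide (((k : Int) + 1) ∈ v :: L) = decide (((k : Int) + 1) ∈ L) := by
            simp [List.mem_cons, hkv]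
          rw [hmem]
          have hne2 : v.toNat - 1 ≠ k := by omega
          simp [hne2]
      · rw [if_neg h]
        rw [ih _ hs]
        have hkv : (k : Int) + 1 ≠ v := by
          intro e
          apply h
          constructor <;> omega
        have : decide (((k : Int) + 1) ∈ v :: L) = decide (((k : Int) + 1) ∈ L) := by
          simp [List.mem_cons, hkv]
        rw [this]

-- ===== VERDICT (by name: the statement is the Claim_ definition above) =====
theorem update_visited_spec : Claim_equal_update_visited := by
  unfold Claim_equal_update_visited Spec_update_visited
  intro path curr_level _
  rw [A_shape]
  set P := PySem.List.slice path none (some curr_level) with hP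
  have hlen : (update_visited_alt path curr_level).length = path.length - 1 := by
    unfold update_visited_alt
    rw [← hP, B_len]
    simp
  apply List.ext_getElem?
  intro k
  by_cases hk : k < path.length - 1
  · have hA : ((List.range (path.length - 1)).map
        (fun (j : Nat) => decide (((j : Int) + 1) ∈ P)))[k]? = some (decide (((k : Int) + 1) ∈ P)) := by
      rw [List.getElem?_map, List.getElem?_range hk, Option.map_some]
    rw [hA]
    unfold update_visited_alt
    rw [← hP, B_inv path.length P k hk _ (by simp)]
    simp
  · have h1 : ((List.range (path.length - 1)).map
        (fun (j : Nat) => decide (((j : Int) + 1) ∈ P)))[k]? = none := by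
      rw [List.getElem?_eq_none] ; simp; omega
    have h2 : (update_visited_alt path curr_level)[k]? = none := by
      rw [List.getElem?_eq_none] ; omega
    rw [h1, h2]
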